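-- pv_equiv track=rewrite | github.com/victorrentea/training-assistant | features/slides/router.py | _order_participant_slides_by_catalog
-- ===== SOURCE A (Python) =====
-- def _order_participant_slides_by_catalog(slides: list[dict], catalog_slides: list[dict]) -> list[dict]:
--     catalog_order: dict[str, int] = {}
--     for idx, entry in enumerate(catalog_slides):
--         slug = str(entry.get("slug") or "").strip()
--         if slug and slug not in catalog_order:
--             catalog_order[slug] = idx
--
--     def _sort_key(entry: dict) -> tuple:
--         slug = str(entry.get("slug") or "").strip()
--         if slug in catalog_order:
--             return (0, catalog_order[slug], str(entry.get("name") or "").lower(), slug)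
--         return (1, str(entry.get("name") or "").lower(), slug)
--
--     return sorted(slides, key=_sort_key)
-- ===== SOURCE B (Python) =====
-- def _order_participant_slides_by_catalog(slides: list[dict], catalog_slides: list[dict]) -> list[dict]:
--     catalog_order: dict[str, int] = {}
--     for idx, entry in enumerate(catalog_slides):
--         slug = str(entry.get("slug") or "").strip()
--         if slug and slug not in catalog_order:
--             catalog_order[slug] = idx
--
--     def _slug(entry: dict) -> str:
--         return str(entry.get("slug") or "").strip()
--
--     def _name(entry: dict) -> str:
--         return str(entry.get("name") or "").lower()
--
--     in_catalog = [s for s in slides if _slug(s) in catalog_order]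
--     rest = [s for s in slides if _slug(s) not in catalog_order]
--     in_catalog.sort(key=lambda s: (catalog_order[_slug(s)], _name(s), _slug(s)))
--     rest.sort(key=lambda s: (_name(s), _slug(s)))
--     return in_catalog + rest
-- ===== Notes on version B (the rewrite author's own statement) =====
-- stated objective: alternative
-- what changed: Instead of one stable sort of the whole list under a heterogeneous group-tagged key, B partitions slides into catalog and non-catalog entries (preserving input order) and stably sorts each group under its own homogeneous key, concatenating the results.
import Mathlib
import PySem

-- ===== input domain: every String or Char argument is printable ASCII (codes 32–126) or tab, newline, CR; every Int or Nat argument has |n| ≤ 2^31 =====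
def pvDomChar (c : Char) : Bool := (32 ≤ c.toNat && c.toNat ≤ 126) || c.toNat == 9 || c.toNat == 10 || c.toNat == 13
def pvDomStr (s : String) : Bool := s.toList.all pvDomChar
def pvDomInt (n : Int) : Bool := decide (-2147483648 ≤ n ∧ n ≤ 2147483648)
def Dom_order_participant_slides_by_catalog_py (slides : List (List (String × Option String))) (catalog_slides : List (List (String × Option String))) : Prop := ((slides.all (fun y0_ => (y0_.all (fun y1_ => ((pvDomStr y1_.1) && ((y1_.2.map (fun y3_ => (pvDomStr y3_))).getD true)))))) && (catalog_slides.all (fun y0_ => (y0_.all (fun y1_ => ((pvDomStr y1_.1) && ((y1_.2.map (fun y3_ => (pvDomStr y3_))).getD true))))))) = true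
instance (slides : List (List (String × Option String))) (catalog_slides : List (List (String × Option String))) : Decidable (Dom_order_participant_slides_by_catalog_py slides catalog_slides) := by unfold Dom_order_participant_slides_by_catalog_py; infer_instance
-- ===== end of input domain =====

-- B replaces A's single stable sort under a group-tagged heterogeneous key by an order-preserving
-- partition into catalog / non-catalog slides, a stable sort of each part under its own key, and a
-- concatenation; same return value, no speed claim.

-- ===== PORT A =====
-- shared derivations, computed identically by both Pythons:
-- str(entry.get("slug") or "").strip()  (dict values are Optional[str]; get returns None when missing)
def pvSlug (e : List (String × Option String)) : String :=
  PySem.Str.strip (((PySem.Dict.get? (PySem.Dict.mk e) "slug").join).getD "")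
-- str(entry.get("name") or "").lower()
def pvName (e : List (String × Option String)) : String :=
  PySem.Str.lower (((PySem.Dict.get? (PySem.Dict.mk e) "name").join).getD "")
-- the catalog_order dict-building loop (identical in A and B)
def pvCatalogOrder (catalog_slides : List (List (String × Option String))) : PySem.Dict String Int :=
  (PySem.List.enumerate catalog_slides 0).foldl
    (fun co p =>
      let slug := pvSlug p.2
      if slug ≠ "" ∧ PySem.Dict.get? co slug = none then PySem.Dict.insert co slug p.1 else co)
    PySem.Dict.empty

-- Python's `<` on tuples of ints/strings, hand-coded (exact: lexicographic, == is equality)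
def pvLex2Lt (a b : String × String) : Bool :=
  decide (a.1 < b.1) || (decide (a.1 = b.1) && decide (a.2 < b.2))
def pvLex3Lt (a b : Int × String × String) : Bool :=
  decide (a.1 < b.1) || (decide (a.1 = b.1) && pvLex2Lt a.2 b.2)
def pvLex4Lt (a b : Int × Int × String × String) : Bool :=
  decide (a.1 < b.1) || (decide (a.1 = b.1) && pvLex3Lt a.2 b.2)

-- A's _sort_key; the group-1 key (1, name, slug) is encoded as (1, 0, name, slug) — exact, since the
-- inserted 0 is the same for every group-1 entry and is compared only against other group-1 entries.
def pvKeyA (co : PySem.Dict String Int) (e : List (String × Option String)) : Int × Int × String × String :=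
  let slug := pvSlug e
  match PySem.Dict.get? co slug with
  | some i => (0, i, pvName e, slug)
  | none   => (1, 0, pvName e, slug)

-- sorted(slides, key=_sort_key): PySem.List.sorted IS this foldl/insertBy stable insertion sort
-- (PySem.List.sorted_eq_foldl_insertBy); the tuple key needs the hand-coded lexicographic `<` above.
def order_participant_slides_by_catalog_py (slides : List (List (String × Option String))) (catalog_slides : List (List (String × Option String))) : List (List (String × Option String)) :=
  let co := pvCatalogOrder catalog_slides
  slides.foldl (fun acc x => PySem.List.insertBy (fun a b => pvLex4Lt (pvKeyA co a) (pvKeyA co b)) x acc) []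

-- ===== PORT B =====
-- key of an in-catalog slide: (catalog_order[slug], name, slug); getD 0 is only reached on entries the
-- filter admits, where the lookup succeeds, so it is Python's catalog_order[_slug(s)] there.
def pvKeyIn (co : PySem.Dict String Int) (e : List (String × Option String)) : Int × String × String :=
  ((PySem.Dict.get? co (pvSlug e)).getD 0, pvName e, pvSlug e)
def pvKeyRest (e : List (String × Option String)) : String × String :=
  (pvName e, pvSlug e)

-- each .sort is the same stable insertion sort (sorted_eq_foldl_insertBy), under its own tuple key
def order_participant_slides_by_catalog_py_alt (slides : List (List (String × Option String))) (catalog_slides : List (List (String × Option String))) : List (List (String × Option String)) :=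
  let co := pvCatalogOrder catalog_slides
  let inCat := slides.filter (fun e => (PySem.Dict.get? co (pvSlug e)).isSome)
  let rest  := slides.filter (fun e => !(PySem.Dict.get? co (pvSlug e)).isSome)
  inCat.foldl (fun acc x => PySem.List.insertBy (fun a b => pvLex3Lt (pvKeyIn co a) (pvKeyIn co b)) x acc) []
    ++ rest.foldl (fun acc x => PySem.List.insertBy (fun a b => pvLex2Lt (pvKeyRest a) (pvKeyRest b)) x acc) []

-- ===== PRECONDITION & SPEC =====
def Spec_order_participant_slides_by_catalog_py (slides : List (List (String × Option String))) (catalog_slides : List (List (String × Option String))) (out : List (List (String × Option String))) : Prop := out = order_participant_slides_by_catalog_py_alt slides catalog_slides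
instance (slides : List (List (String × Option String))) (catalog_slides : List (List (String × Option String))) (out : List (List (String × Option String))) : Decidable (Spec_order_participant_slides_by_catalog_py slides catalog_slides out) := by unfold Spec_order_participant_slides_by_catalog_py; infer_instance

-- ===== CLAIM (what is proved, stated in full; the proofs are below) =====
def Claim_equal_order_participant_slides_by_catalog_py : Prop := ∀ (slides : List (List (String × Option String))) (catalog_slides : List (List (String × Option String))), Dom_order_participant_slides_by_catalog_py slides catalog_slides → Spec_order_participant_slides_by_catalog_py slides catalog_slides (order_participant_slides_by_catalog_py slides catalog_slides)

-- ===== LEMMAS AND PROOFS =====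

-- inserting an element that goes before everything in ys2 only touches the ys1 part
theorem pv_insertBy_left {α : Type} (b : α → α → Bool) (x : α) (ys1 ys2 : List α)
    (h : ∀ y ∈ ys2, b x y = true) :
    PySem.List.insertBy b x (ys1 ++ ys2) = PySem.List.insertBy b x ys1 ++ ys2 := by
  induction ys1 with
  | nil =>
    cases ys2 with
    | nil => rfl
    | cons y t => simp [PySem.List.insertBy, h y (by simp)]
  | cons y t ih =>
    simp only [List.cons_append, PySem.List.insertBy]
    split <;> simp [ih]

-- inserting an element that goes after everything in ys1 only touches the ys2 part
theorem pv_insertBy_right {α : Type} (b : α → α → Bool) (x : α) (ys1 ys2 : List α)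
    (h : ∀ y ∈ ys1, b x y = false) :
    PySem.List.insertBy b x (ys1 ++ ys2) = ys1 ++ PySem.List.insertBy b x ys2 := by
  induction ys1 with
  | nil => rfl
  | cons y t ih =>
    simp only [List.cons_append, PySem.List.insertBy, h y (by simp)]
    simp only [Bool.false_eq_true, if_false, List.cons.injEq, true_and]
    exact ih (fun y hy => h y (by simp [hy]))

-- insertBy only looks at comparisons of x with members of ys
theorem pv_insertBy_congr {α : Type} (b b' : α → α → Bool) (x : α) (ys : List α)
    (h : ∀ y ∈ ys, b x y = b' x y) :
    PySem.List.insertBy b x ys = PySem.List.insertBy b' x ys := by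
  induction ys with
  | nil => rfl
  | cons y t ih =>
    simp only [PySem.List.insertBy, h y (by simp)]
    split <;> simp [ih (fun y hy => h y (by simp [hy]))]

-- a stable insertion sort whose comparator strictly separates group p from group ¬p splits into the
-- two independent sorts of the order-preserving partition
theorem pv_foldl_insertBy_split {α : Type} (b : α → α → Bool) (p : α → Bool)
    (hcross : ∀ x y, p x = true → p y = false → b x y = true ∧ b y x = false) :
    ∀ (l acc0 acc1 : List α), (∀ a ∈ acc0, p a = true) → (∀ a ∈ acc1, p a = false) →
    l.foldl (fun acc x => PySem.List.insertBy b x acc) (acc0 ++ acc1)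
      = (l.filter p).foldl (fun acc x => PySem.List.insertBy b x acc) acc0
        ++ (l.filter (fun x => !p x)).foldl (fun acc x => PySem.List.insertBy b x acc) acc1 := by
  intro l
  induction l with
  | nil => intro acc0 acc1 _ _; rfl
  | cons x t ih =>
    intro acc0 acc1 h0 h1
    by_cases hp : p x = true
    · rw [List.foldl_cons, pv_insertBy_left b x acc0 acc1 (fun y hy => (hcross x y hp (h1 y hy)).1),
        ih (PySem.List.insertBy b x acc0) acc1
          (fun a ha => by rcases (PySem.List.mem_insertBy b x a acc0).mp ha with h | h
                          · exact h ▸ hp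
                          · exact h0 a h) h1]
      simp [hp]
    · have hp' : p x = false := by simpa using hp
      rw [List.foldl_cons, pv_insertBy_right b x acc0 acc1 (fun y hy => (hcross y x (h0 y hy) hp').2),
        ih acc0 (PySem.List.insertBy b x acc1)
          h0
          (fun a ha => by rcases (PySem.List.mem_insertBy b x a acc1).mp ha with h | h
                          · exact h ▸ hp'
                          · exact h1 a h)]
      simp [hp']

-- two insertion sorts whose comparators agree on all pairs drawn from q produce the same list
theorem pv_foldl_insertBy_congr {α : Type} (b b' : α → α → Bool) (q : α → Bool)
    (h : ∀ x y, q x = true → q y = true → b x y = b' x y) :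
    ∀ (l acc : List α), (∀ a ∈ l, q a = true) → (∀ a ∈ acc, q a = true) →
    l.foldl (fun acc x => PySem.List.insertBy b x acc) acc
      = l.foldl (fun acc x => PySem.List.insertBy b' x acc) acc := by
  intro l
  induction l with
  | nil => intro acc _ _; rfl
  | cons x t ih =>
    intro acc hl hacc
    have hx : q x = true := hl x (by simp)
    rw [List.foldl_cons,
      pv_insertBy_congr b b' x acc (fun y hy => h x y hx (hacc y hy)),
      List.foldl_cons,
      ih (PySem.List.insertBy b' x acc) (fun a ha => hl a (by simp [ha]))
        (fun a ha => by rcases (PySem.List.mem_insertBy b' x a acc).mp ha with hh | hh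
                        · exact hh ▸ hx
                        · exact hacc a hh)]

-- an in-catalog slide sorts strictly before any out-of-catalog slide under A's key
theorem pv_cross (co : PySem.Dict String Int) (x y : List (String × Option String))
    (hx : (PySem.Dict.get? co (pvSlug x)).isSome = true)
    (hy : (fun e => (PySem.Dict.get? co (pvSlug e)).isSome) y = false) :
    pvLex4Lt (pvKeyA co x) (pvKeyA co y) = true ∧ pvLex4Lt (pvKeyA co y) (pvKeyA co x) = false := by
  obtain ⟨i, hi⟩ := Option.isSome_iff_exists.mp hx
  have hy' : PySem.Dict.get? co (pvSlug y) = none := by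
    simpa using hy
  constructor <;> simp [pvKeyA, hi, hy', pvLex4Lt]

-- on two in-catalog slides A's comparator is B's in-catalog comparator
theorem pv_agree_in (co : PySem.Dict String Int) (x y : List (String × Option String))
    (hx : (fun e => (PySem.Dict.get? co (pvSlug e)).isSome) x = true)
    (hy : (fun e => (PySem.Dict.get? co (pvSlug e)).isSome) y = true) :
    pvLex4Lt (pvKeyA co x) (pvKeyA co y) = pvLex3Lt (pvKeyIn co x) (pvKeyIn co y) := by
  obtain ⟨i, hi⟩ := Option.isSome_iff_exists.mp hx
  obtain ⟨j, hj⟩ := Option.isSome_iff_exists.mp hy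
  simp [pvKeyA, pvKeyIn, hi, hj, pvLex4Lt]

-- on two out-of-catalog slides A's comparator is B's rest comparator
theorem pv_agree_rest (co : PySem.Dict String Int) (x y : List (String × Option String))
    (hx : (fun e => !(PySem.Dict.get? co (pvSlug e)).isSome) x = true)
    (hy : (fun e => !(PySem.Dict.get? co (pvSlug e)).isSome) y = true) :
    pvLex4Lt (pvKeyA co x) (pvKeyA co y) = pvLex2Lt (pvKeyRest x) (pvKeyRest y) := by
  have hx' : PySem.Dict.get? co (pvSlug x) = none := by
    simpa [Option.isSome_iff_exists] using hx
  have hy' : PySem.Dict.get? co (pvSlug y) = none := by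
    simpa [Option.isSome_iff_exists] using hy
  simp [pvKeyA, pvKeyRest, hx', hy', pvLex4Lt, pvLex3Lt]

-- ===== VERDICT (by name: the statement is the Claim_ definition above) =====
theorem order_participant_slides_by_catalog_py_spec : Claim_equal_order_participant_slides_by_catalog_py := by
  intro slides catalog_slides _
  unfold Spec_order_participant_slides_by_catalog_py
  unfold order_participant_slides_by_catalog_py order_participant_slides_by_catalog_py_alt
  set co := pvCatalogOrder catalog_slides with hco
  set p : List (String × Option String) → Bool := fun e => (PySem.Dict.get? co (pvSlug e)).isSome with hp
  have hsplit := pv_foldl_insertBy_split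
    (fun a b => pvLex4Lt (pvKeyA co a) (pvKeyA co b)) p
    (fun x y hx hy => pv_cross co x y hx hy)
    slides [] [] (by simp) (by simp)
  simp only [List.nil_append] at hsplit
  rw [hsplit]
  congr 1
  · exact pv_foldl_insertBy_congr _ _ p
      (fun x y hx hy => pv_agree_in co x y hx hy)
      (slides.filter p) [] (fun a ha => (List.mem_filter.mp ha).2) (by simp)
  · exact pv_foldl_insertBy_congr _ _ (fun x => !p x)
      (fun x y hx hy => pv_agree_rest co x y hx hy)
      (slides.filter (fun x => !p x)) [] (fun a ha => (List.mem_filter.mp ha).2) (by simp)
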